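-- pv_equiv track=rewrite | github.com/gces-govhub/gov-hub | legacy/integrate_data_advanced.py | detect_file_source
-- ===== SOURCE A (Python) =====
-- def detect_file_source(filename):
--     """Detecta a fonte do arquivo baseado no nome"""
--     filename_lower = filename.lower()
--
--     if any(x in filename_lower for x in ["siafi", "despesas", "orcament"]):
--         return "siafi"
--     elif any(x in filename_lower for x in ["contrato", "compras", "licitac"]):
--         return "compras"
--     elif any(x in filename_lower for x in ["convenio", "transfere", "transfer"]):
--         return "transferegov"
--     else:
--         return "unknown"
-- ===== SOURCE B (Python) =====
-- KEYWORD_LABELS = (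
--     ("siafi", "siafi"), ("despesas", "siafi"), ("orcament", "siafi"),
--     ("contrato", "compras"), ("compras", "compras"), ("licitac", "compras"),
--     ("convenio", "transferegov"), ("transfere", "transferegov"), ("transfer", "transferegov"),
-- )
-- PRIORITY = ("siafi", "compras", "transferegov")
--
-- def detect_file_source(filename):
--     """Detecta a fonte do arquivo baseado no nome"""
--     low = filename.lower()
--     found = set()
--     for i in range(len(low)):
--         for kw, label in KEYWORD_LABELS:
--             if low.startswith(kw, i):
--                 found.add(label)
--     for label in PRIORITY:
--         if label in found:
--             return label
--     return "unknown"
-- ===== Notes on version B (the rewrite author's own statement) =====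
-- stated objective: alternative
-- what changed: Replaces per-keyword substring membership tests with a naive multi-pattern scanner: one pass over every position of the lowered filename checking each keyword as a prefix there, accumulating matched labels in a set, then a separate priority pass picks the answer.
import Mathlib
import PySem

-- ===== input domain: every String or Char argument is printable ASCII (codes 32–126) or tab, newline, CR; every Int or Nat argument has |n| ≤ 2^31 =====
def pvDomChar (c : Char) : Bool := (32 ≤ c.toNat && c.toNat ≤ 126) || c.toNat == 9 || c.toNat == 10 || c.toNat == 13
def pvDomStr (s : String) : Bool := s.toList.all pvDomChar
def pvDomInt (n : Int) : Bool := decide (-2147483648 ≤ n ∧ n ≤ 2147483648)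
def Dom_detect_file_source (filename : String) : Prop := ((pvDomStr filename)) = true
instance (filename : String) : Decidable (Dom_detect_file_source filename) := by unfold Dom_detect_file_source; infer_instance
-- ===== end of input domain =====

-- B is an alternative algorithm of the same cost: a naive multi-pattern scanner over string
-- positions collecting matched labels in a set, then a priority pass (vs A's per-keyword
-- substring membership tests in an if/elif chain).

-- ===== PORT A =====
def detect_file_source (filename : String) : String :=
  let filename_lower := PySem.Str.lower filename
  if ["siafi", "despesas", "orcament"].any (fun x => PySem.Str.isIn x filename_lower) then
    "siafi"
  else if ["contrato", "compras", "licitac"].any (fun x => PySem.Str.isIn x filename_lower) then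
    "compras"
  else if ["convenio", "transfere", "transfer"].any (fun x => PySem.Str.isIn x filename_lower) then
    "transferegov"
  else
    "unknown"

-- ===== PORT B =====
def KEYWORD_LABELS : List (String × String) :=
  [("siafi", "siafi"), ("despesas", "siafi"), ("orcament", "siafi"),
   ("contrato", "compras"), ("compras", "compras"), ("licitac", "compras"),
   ("convenio", "transferegov"), ("transfere", "transferegov"), ("transfer", "transferegov")]

def PRIORITY : List String := ["siafi", "compras", "transferegov"]

-- low.startswith(kw, i) with 0 ≤ i is exactly Chars.startswith on (low.drop i); the scan's i
-- ranges over [0, len(low)), so this is exact.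
def detect_file_source_alt (filename : String) : String :=
  let low := (PySem.Str.lower filename).toList
  let found : PySem.Set String :=
    (List.range low.length).foldl (fun acc i =>
      KEYWORD_LABELS.foldl (fun acc2 p =>
        if PySem.Chars.startswith (low.drop i) p.1.toList then PySem.Set.add acc2 p.2 else acc2)
        acc)
      PySem.Set.empty
  match PRIORITY.find? (fun label => PySem.Set.contains found label) with
  | some label => label
  | none => "unknown"

-- ===== PRECONDITION & SPEC =====
def Spec_detect_file_source (filename : String) (out : String) : Prop := out = detect_file_source_alt filename
instance (filename : String) (out : String) : Decidable (Spec_detect_file_source filename out) := by unfold Spec_detect_file_source; infer_instance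

-- ===== CLAIM (what is proved, stated in full; the proofs are below) =====
def Claim_equal_detect_file_source : Prop := ∀ (filename : String), Dom_detect_file_source filename → Spec_detect_file_source filename (detect_file_source filename)

-- ===== LEMMAS AND PROOFS =====

-- membership after the inner fold over the keyword table
lemma mem_inner (low : List Char) (i : Nat) (ps : List (String × String)) (acc : PySem.Set String) (l : String) :
    l ∈ ps.foldl (fun acc2 p =>
        if PySem.Chars.startswith (low.drop i) p.1.toList then PySem.Set.add acc2 p.2 else acc2) acc ↔
      l ∈ acc ∨ ∃ p ∈ ps, PySem.Chars.startswith (low.drop i) p.1.toList = true ∧ p.2 = l := by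
  induction ps generalizing acc with
  | nil => simp
  | cons p rest ih =>
    simp only [List.foldl_cons, List.mem_cons, ih]
    split_ifs with h
    · rw [PySem.Set.mem_add]
      constructor
      · rintro (⟨h1 | h1⟩ | ⟨q, hq, hc, he⟩)
        · exact Or.inl h1
        · exact Or.inr ⟨p, Or.inl rfl, h, h1.symm⟩
        · exact Or.inr ⟨q, Or.inr hq, hc, he⟩
      · rintro (h1 | ⟨q, hq | hq, hc, he⟩)
        · exact Or.inl (Or.inl h1)
        · exact Or.inl (Or.inr (hq ▸ he).symm)
        · exact Or.inr ⟨q, hq, hc, he⟩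
    · constructor
      · rintro (h1 | ⟨q, hq, hc, he⟩)
        · exact Or.inl h1
        · exact Or.inr ⟨q, Or.inr hq, hc, he⟩
      · rintro (h1 | ⟨q, hq | hq, hc, he⟩)
        · exact Or.inl h1
        · exact absurd (hq ▸ hc) (by simpa using h)
        · exact Or.inr ⟨q, hq, hc, he⟩

-- membership after the outer fold over positions
lemma mem_outer (low : List Char) (n : Nat) (acc : PySem.Set String) (l : String) :
    l ∈ (List.range n).foldl (fun acc i =>
        KEYWORD_LABELS.foldl (fun acc2 p =>
          if PySem.Chars.startswith (low.drop i) p.1.toList then PySem.Set.add acc2 p.2 else acc2)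
          acc) acc ↔
      l ∈ acc ∨ ∃ i < n, ∃ p ∈ KEYWORD_LABELS,
        PySem.Chars.startswith (low.drop i) p.1.toList = true ∧ p.2 = l := by
  induction n generalizing acc with
  | zero => simp
  | succ n ih =>
    rw [List.range_succ, List.foldl_append]
    simp only [List.foldl_cons, List.foldl_nil, ih, mem_inner]
    constructor
    · rintro (⟨h1 | ⟨i, hi, q, hq, hc, he⟩⟩ | ⟨q, hq, hc, he⟩)
      · exact Or.inl h1
      · exact Or.inr ⟨i, Nat.lt_succ_of_lt hi, q, hq, hc, he⟩
      · exact Or.inr ⟨n, Nat.lt_succ_self n, q, hq, hc, he⟩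
    · rintro (h1 | ⟨i, hi, q, hq, hc, he⟩)
      · exact Or.inl (Or.inl h1)
      · rcases Nat.lt_succ_iff_lt_or_eq.mp hi with hi' | rfl
        · exact Or.inl (Or.inr ⟨i, hi', q, hq, hc, he⟩)
        · exact Or.inr ⟨q, hq, hc, he⟩

-- a bounded prefix-at-position witness is the same as substring membership (nonempty pattern)
lemma bounded_isIn (low : List Char) (sub : List Char) (hne : sub ≠ []) :
    (∃ i < low.length, PySem.Chars.startswith (low.drop i) sub = true) ↔
      PySem.Chars.isIn sub low = true := by
  rw [← PySem.Chars.exists_prefix_drop_iff_isIn]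
  constructor
  · rintro ⟨i, _, h⟩
    exact ⟨i, (PySem.Chars.startswith_iff _ _).mp h⟩
  · rintro ⟨j, hj⟩
    by_cases hlt : j < low.length
    · exact ⟨j, hlt, (PySem.Chars.startswith_iff _ _).mpr hj⟩
    · exfalso
      have : low.drop j = [] := List.drop_eq_nil_of_le (Nat.le_of_not_lt hlt)
      rw [this] at hj
      exact hne (List.prefix_nil.mp hj)

lemma found_iff (low : List Char) (l : String) (kws : List String)
    (hl : ∀ p ∈ KEYWORD_LABELS, p.2 = l ↔ p.1 ∈ kws)
    (hcov : ∀ k ∈ kws, (k, l) ∈ KEYWORD_LABELS)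
    (hne : ∀ k ∈ kws, k.toList ≠ []) :
    (l ∈ (List.range low.length).foldl (fun acc i =>
        KEYWORD_LABELS.foldl (fun acc2 p =>
          if PySem.Chars.startswith (low.drop i) p.1.toList then PySem.Set.add acc2 p.2 else acc2)
          acc) PySem.Set.empty) ↔
      kws.any (fun k => PySem.Chars.isIn k.toList low) = true := by
  rw [mem_outer]
  simp only [PySem.Set.empty, List.not_mem_nil, false_or, List.any_eq_true]
  constructor
  · rintro ⟨i, hi, p, hp, hc, he⟩
    refine ⟨p.1, (hl p hp).mp he, ?_⟩
    exact (bounded_isIn low p.1.toList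
      (hne p.1 ((hl p hp).mp he))).mp ⟨i, hi, hc⟩
  · rintro ⟨k, hk, hin⟩
    rcases (bounded_isIn low k.toList (hne k hk)).mpr hin with ⟨i, hi, hc⟩
    exact ⟨i, hi, (k, l), hcov k hk, hc, rfl⟩

lemma set_contains_iff (s : PySem.Set String) (x : String) :
    PySem.Set.contains s x = true ↔ x ∈ s := by
  simp [PySem.Set.contains]

-- ===== VERDICT (by name: the statement is the Claim_ definition above) =====
theorem detect_file_source_spec : Claim_equal_detect_file_source := by
  intro filename _
  unfold Spec_detect_file_source detect_file_source detect_file_source_alt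
  dsimp only
  set low := (PySem.Str.lower filename).toList with hlow
  set F := (List.range low.length).foldl (fun acc i =>
      KEYWORD_LABELS.foldl (fun acc2 p =>
        if PySem.Chars.startswith (low.drop i) p.1.toList then PySem.Set.add acc2 p.2 else acc2)
        acc) PySem.Set.empty with hF
  have h1 : PySem.Set.contains F "siafi" =
      (["siafi", "despesas", "orcament"].any (fun k => PySem.Chars.isIn k.toList low)) := by
    rw [Bool.eq_iff_iff, set_contains_iff, hF]
    exact found_iff low "siafi" _ (by decide) (by decide) (by decide)
  have h2 : PySem.Set.contains F "compras" =
      (["contrato", "compras", "licitac"].any (fun k => PySem.Chars.isIn k.toList low)) := by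
    rw [Bool.eq_iff_iff, set_contains_iff, hF]
    exact found_iff low "compras" _ (by decide) (by decide) (by decide)
  have h3 : PySem.Set.contains F "transferegov" =
      (["convenio", "transfere", "transfer"].any (fun k => PySem.Chars.isIn k.toList low)) := by
    rw [Bool.eq_iff_iff, set_contains_iff, hF]
    exact found_iff low "transferegov" _ (by decide) (by decide) (by decide)
  simp only [PRIORITY, List.find?, h1, h2, h3, List.any_cons, List.any_nil,
    PySem.Str.isIn_eq, ← hlow]
  clear h1 h2 h3 hF
  clear_value F
  clear F
  split_ifs with c1 c2 c3 <;> simp_all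
  · rcases c1 with h | h | h <;> simp [h]
  · rcases c2 with h | h | h <;> simp [h]
  · rcases c3 with h | h | h <;> simp [h]
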